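-- pv_equiv track=rewrite | github.com/ChrisHochelagProle/PythonPractice | String learning/extraires_mots_voyelles.py | mots_avec_deux_voyelles
-- ===== SOURCE A (Python) =====
-- def mots_avec_deux_voyelles(chaine):
--     # list_voyelle = ("a", "e", "i", "o", "u", "y")
--     voyelles = "AEIOUYaeiouy"
--     # liste_mots = chaine.lower().split()
--     liste_mots = chaine.split()
--     liste_mots_voyelles = []
--     for mot in liste_mots:
--         second_vowel = False
--         for lettre in mot:
--             # if lettre in list_voyelle and second_vowel:
--             if lettre in voyelles and second_vowel:
--                 liste_mots_voyelles.append(mot)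
--                 break
--             # elif lettre in list_voyelle:
--             elif lettre in voyelles:
--                 second_vowel = True
--     return liste_mots_voyelles
-- ===== SOURCE B (Python) =====
-- def mots_avec_deux_voyelles(chaine):
--     voyelles = "AEIOUYaeiouy"
--     return [mot for mot in chaine.split()
--             if sum(1 for c in mot if c in voyelles) >= 2]
-- ===== Notes on version B (the rewrite author's own statement) =====
-- stated objective: simpler
-- what changed: Replaces the stateful second_vowel flag with early break by a whole-word vowel tally compared against the threshold 2, in a single filtering comprehension.
import Mathlib
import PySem

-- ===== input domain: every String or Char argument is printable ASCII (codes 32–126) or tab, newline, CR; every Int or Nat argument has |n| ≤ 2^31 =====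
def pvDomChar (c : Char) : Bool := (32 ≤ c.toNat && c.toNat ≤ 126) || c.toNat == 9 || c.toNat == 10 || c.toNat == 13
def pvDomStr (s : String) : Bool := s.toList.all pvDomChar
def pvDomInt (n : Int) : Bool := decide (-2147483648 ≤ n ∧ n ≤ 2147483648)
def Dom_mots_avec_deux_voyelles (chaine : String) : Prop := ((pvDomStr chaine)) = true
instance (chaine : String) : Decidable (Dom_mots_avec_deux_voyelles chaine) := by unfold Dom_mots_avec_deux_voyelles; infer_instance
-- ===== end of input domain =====

-- B replaces A's stateful second_vowel flag + early break by a whole-word vowel count compared with 2 (simpler decomposition).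

-- ===== PORT A =====
-- 'lettre in voyelles' for the fixed vowel string
def pvVoyelle (c : Char) : Bool := "AEIOUYaeiouy".toList.contains c

-- the inner 'for lettre in mot' loop with the second_vowel flag and the break
def pvAInner : List Char → Bool → Bool
  | [], _ => false
  | c :: rest, sv =>
      if pvVoyelle c && sv then true
      else if pvVoyelle c then pvAInner rest true
      else pvAInner rest sv

def mots_avec_deux_voyelles (chaine : String) : List String :=
  (PySem.Str.split₀ chaine).foldl
    (fun acc mot => if pvAInner mot.toList false then acc ++ [mot] else acc) []

-- ===== PORT B =====
def mots_avec_deux_voyelles_alt (chaine : String) : List String :=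
  (PySem.Str.split₀ chaine).filter
    (fun mot => 2 ≤ mot.toList.countP (fun c => "AEIOUYaeiouy".toList.contains c))

-- ===== PRECONDITION & SPEC =====
def Spec_mots_avec_deux_voyelles (chaine : String) (out : List String) : Prop := out = mots_avec_deux_voyelles_alt chaine
instance (chaine : String) (out : List String) : Decidable (Spec_mots_avec_deux_voyelles chaine out) := by unfold Spec_mots_avec_deux_voyelles; infer_instance

-- ===== CLAIM (what is proved, stated in full; the proofs are below) =====
def Claim_equal_mots_avec_deux_voyelles : Prop := ∀ (chaine : String), Dom_mots_avec_deux_voyelles chaine → Spec_mots_avec_deux_voyelles chaine (mots_avec_deux_voyelles chaine)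

-- ===== LEMMAS AND PROOFS =====
theorem pvAInner_eq_countP (l : List Char) (sv : Bool) :
    pvAInner l sv = decide (2 ≤ (if sv then 1 else 0) + l.countP pvVoyelle) := by
  induction l generalizing sv with
  | nil => cases sv <;> simp [pvAInner]
  | cons c rest ih =>
      cases h : pvVoyelle c <;> cases sv <;>
        simp only [pvAInner, h, ih, List.countP_cons, Bool.and_true, Bool.and_false,
          if_true, if_false, Bool.false_eq_true] <;>
        first
        | (rw [decide_eq_decide]; omega)
        | (rw [eq_comm, decide_eq_true_eq]; omega)

theorem mots_avec_deux_voyelles_spec : Claim_equal_mots_avec_deux_voyelles := by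
  intro chaine _
  unfold Spec_mots_avec_deux_voyelles mots_avec_deux_voyelles mots_avec_deux_voyelles_alt
  rw [PySem.List.foldl_append_if_eq_filter]
  simp only [List.nil_append]
  apply List.filter_congr
  intro mot _
  rw [pvAInner_eq_countP,
    show (fun c => "AEIOUYaeiouy".toList.contains c) = pvVoyelle from rfl,
    decide_eq_decide]
  simp only [Bool.false_eq_true, if_false]
  omega
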